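-- pv_equiv track=rewrite | github.com/cvr-bhupalreddy/dsa-python-2025 | DSA/DP/DP_MCM/7.PartitionArray_Max_Sum.py | maxSumTab
-- ===== SOURCE A (Python) =====
-- from typing import List
--
-- def maxSumTab(arr: List[int], k: int) -> int:
--     n = len(arr)
--     dp = [0]*(n+1)  # dp[i] = max sum for first i elements
--
--     for i in range(1, n+1):
--         curr_max = 0
--         for l in range(1, min(k, i)+1):
--             curr_max = max(curr_max, arr[i-l])
--             dp[i] = max(dp[i], dp[i-l] + curr_max*l)
--
--     return dp[n]
-- ===== SOURCE B (Python) =====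
-- def maxSumTab(arr, k):
--     # Top-down demand-driven evaluation: an explicit stack of pending prefix
--     # lengths and a memo dict, instead of A's bottom-up dp table.
--     n = len(arr)
--     memo = {0: 0}
--     stack = [n]
--     while stack:
--         i = stack[-1]
--         if i in memo:
--             stack.pop()
--             continue
--         if i - 1 not in memo:
--             stack.append(i - 1)
--             continue
--         best = 0
--         cm = 0
--         for l in range(1, min(k, i) + 1):
--             cm = max(cm, arr[i - l])
--             best = max(best, memo[i - l] + cm * l)
--         memo[i] = best
--         stack.pop()
--     return memo[n]
-- ===== Notes on version B (the rewrite author's own statement) =====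
-- stated objective: alternative
-- what changed: Replaces A's bottom-up dp array filled for every index in order by a top-down demand-driven evaluation: an explicit stack of pending prefix lengths with a memo dict, computing each subproblem when its dependencies are ready.
import Mathlib
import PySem

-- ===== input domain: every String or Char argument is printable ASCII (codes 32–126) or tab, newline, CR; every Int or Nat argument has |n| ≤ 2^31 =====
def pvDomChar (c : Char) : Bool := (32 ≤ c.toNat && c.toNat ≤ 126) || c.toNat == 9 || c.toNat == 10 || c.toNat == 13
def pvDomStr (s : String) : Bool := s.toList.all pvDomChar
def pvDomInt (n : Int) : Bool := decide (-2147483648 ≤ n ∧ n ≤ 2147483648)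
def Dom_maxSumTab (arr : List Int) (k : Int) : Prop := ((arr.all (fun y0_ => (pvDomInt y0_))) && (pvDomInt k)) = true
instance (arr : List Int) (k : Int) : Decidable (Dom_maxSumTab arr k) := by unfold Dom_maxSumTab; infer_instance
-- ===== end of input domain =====

-- B replaces A's bottom-up dp table by a top-down demand-driven evaluation (explicit
-- stack of pending prefix lengths + memo dict); objective: alternative decomposition.

-- ===== PORT A =====
def maxSumTab (arr : List Int) (k : Int) : Int :=
  let n : Int := arr.length
  let dp : List Int := List.replicate (arr.length + 1) 0
  let dp := (PySem.List.pyRange 1 (n + 1) 1).foldl (fun dp i =>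
    ((PySem.List.pyRange 1 (min k i + 1) 1).foldl (fun (st : List Int × Int) l =>
        let cm := max st.2 (PySem.List.pyGetD arr (i - l) 0)
        (st.1.set i.toNat (max (PySem.List.pyGetD st.1 i 0) (PySem.List.pyGetD st.1 (i - l) 0 + cm * l)), cm))
      (dp, 0)).1) dp
  PySem.List.pyGetD dp n 0

-- ===== PORT B =====
-- B's while-loop over (memo, stack); head of the Lean list is Python's stack top.
-- The fuel argument only makes the loop total: 2*len(arr)+3 iterations always suffice
-- (proved below: the run ends by emptying the stack, never by exhausting fuel).
def pvLoopB (arr : List Int) (k : Int) : Nat → PySem.Dict Int Int → List Int → PySem.Dict Int Int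
  | 0, memo, _ => memo
  | fuel+1, memo, stack =>
    match stack with
    | [] => memo
    | i :: rest =>
      if memo.contains i then pvLoopB arr k fuel memo rest
      else if !(memo.contains (i - 1)) then pvLoopB arr k fuel memo ((i - 1) :: i :: rest)
      else
        let st := (PySem.List.pyRange 1 (min k i + 1) 1).foldl
          (fun (st : Int × Int) l =>
            let cm := max st.2 (PySem.List.pyGetD arr (i - l) 0)
            (max st.1 (memo.getD (i - l) 0 + cm * l), cm)) (0, 0)
        pvLoopB arr k fuel (memo.insert i st.1) rest

def maxSumTab_alt (arr : List Int) (k : Int) : Int :=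
  let n : Int := arr.length
  let memo := pvLoopB arr k (2 * arr.length + 3) ((PySem.Dict.empty).insert 0 0) [n]
  memo.getD n 0

-- ===== PRECONDITION & SPEC =====
def Spec_maxSumTab (arr : List Int) (k : Int) (out : Int) : Prop := out = maxSumTab_alt arr k
instance (arr : List Int) (k : Int) (out : Int) : Decidable (Spec_maxSumTab arr k out) := by unfold Spec_maxSumTab; infer_instance

-- ===== CLAIM (what is proved, stated in full; the proofs are below) =====
def Claim_equal_maxSumTab : Prop := ∀ (arr : List Int) (k : Int), Dom_maxSumTab arr k → Spec_maxSumTab arr k (maxSumTab arr k)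

-- ===== LEMMAS AND PROOFS =====

-- the shared inner loop: (best, cm) after scanning block lengths l = 1 .. min(k,i), reading
-- previous optima through g
def pvInner (arr : List Int) (k : Int) (g : Int → Int) (i : Int) : Int × Int :=
  (PySem.List.pyRange 1 (min k i + 1) 1).foldl
    (fun (st : Int × Int) l =>
      let cm := max st.2 (PySem.List.pyGetD arr (i - l) 0)
      (max st.1 (g (i - l) + cm * l), cm)) (0, 0)

-- the mathematical table of optima, built structurally
def pvTab (arr : List Int) (k : Int) : Nat → List Int
  | 0 => [0]
  | i+1 =>
    let t := pvTab arr k i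
    t ++ [(pvInner arr k (fun j => t.getD j.toNat 0) ((i : Int) + 1)).1]

def pvF (arr : List Int) (k : Int) (i : Nat) : Int := (pvTab arr k i).getD i 0

lemma pvTab_length (arr : List Int) (k : Int) (i : Nat) : (pvTab arr k i).length = i + 1 := by
  induction i with
  | zero => rfl
  | succ i ih => simp [pvTab, ih]

lemma pvTab_getD_prefix (arr : List Int) (k : Int) (i j : Nat) (h : j ≤ i) :
    (pvTab arr k i).getD j 0 = pvF arr k j := by
  induction i with
  | zero => interval_cases j; rfl
  | succ i ih =>
    rcases Nat.lt_or_ge j (i + 1) with hj | hj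
    · have hj' : j ≤ i := by omega
      show ((pvTab arr k i) ++ _).getD j 0 = _
      rw [List.getD_append _ _ _ _ (by rw [pvTab_length]; omega)]
      exact ih hj'
    · have : j = i + 1 := by omega
      subst this
      rfl

lemma pvInner_congr (arr : List Int) (k : Int) (g g' : Int → Int) (i : Int)
    (h : ∀ l : Int, 1 ≤ l → l ≤ min k i → g (i - l) = g' (i - l)) :
    pvInner arr k g i = pvInner arr k g' i := by
  unfold pvInner
  apply PySem.List.foldl_congr_mem
  intro acc l hl
  rw [PySem.List.mem_pyRange_one] at hl
  simp only []
  rw [h l hl.1 (by omega)]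

lemma pvF_succ (arr : List Int) (k : Int) (i : Nat) :
    pvF arr k (i + 1) = (pvInner arr k (fun j => pvF arr k j.toNat) ((i : Int) + 1)).1 := by
  show ((pvTab arr k i) ++ _).getD (i+1) 0 = _
  rw [List.getD_append_right (h := by rw [pvTab_length])]
  rw [pvTab_length]
  simp only [Nat.sub_self, List.getD_cons_zero]
  congr 1
  apply pvInner_congr
  intro l h1 h2
  have hl : l ≤ (i : Int) + 1 := by omega
  rw [pvTab_getD_prefix arr k i ((((i:Int)+1) - l).toNat) (by omega)]

-- ===== A-side =====

-- the target state of A's dp list after outer iterations 1..j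
def pvTgt (arr : List Int) (k : Int) (j : Nat) : List Int :=
  (List.range (arr.length + 1)).map (fun t => if t ≤ j then pvF arr k t else 0)

lemma pvTgt_length (arr : List Int) (k : Int) (j : Nat) :
    (pvTgt arr k j).length = arr.length + 1 := by simp [pvTgt]

lemma pvTgt_getD (arr : List Int) (k : Int) (j t : Nat) (h : t < arr.length + 1) :
    (pvTgt arr k j).getD t 0 = if t ≤ j then pvF arr k t else 0 := by
  exact PySem.List.getD_map_range (fun t => if t ≤ j then pvF arr k t else 0) (arr.length + 1) t 0 h

-- A's inner fold, run on a dp list that only ever changes at index i, is pvInner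
lemma pvInnerA (arr : List Int) (k : Int) (i : Int) (L : List Int)
    (hi : 0 ≤ i) (hlen : i.toNat < L.length) :
    ∀ (ls : List Int), (∀ l ∈ ls, 1 ≤ l ∧ l ≤ i) →
    ∀ (best cm : Int),
      ls.foldl (fun (st : List Int × Int) l =>
          (st.1.set i.toNat (max (PySem.List.pyGetD st.1 i 0)
              (PySem.List.pyGetD st.1 (i - l) 0 + max st.2 (PySem.List.pyGetD arr (i - l) 0) * l)),
           max st.2 (PySem.List.pyGetD arr (i - l) 0)))
        (L.set i.toNat best, cm)
      = (L.set i.toNat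
          (ls.foldl (fun (st : Int × Int) l =>
              (max st.1 (PySem.List.pyGetD L (i - l) 0 + max st.2 (PySem.List.pyGetD arr (i - l) 0) * l),
               max st.2 (PySem.List.pyGetD arr (i - l) 0))) (best, cm)).1,
         (ls.foldl (fun (st : Int × Int) l =>
              (max st.1 (PySem.List.pyGetD L (i - l) 0 + max st.2 (PySem.List.pyGetD arr (i - l) 0) * l),
               max st.2 (PySem.List.pyGetD arr (i - l) 0))) (best, cm)).2) := by
  intro ls
  induction ls with
  | nil => intro _ best cm; rfl
  | cons l ls ih =>
    intro hls best cm
    obtain ⟨hl1, hl2⟩ := hls l List.mem_cons_self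
    have hiL : i < (L.length : Int) := by omega
    have e1 : PySem.List.pyGetD (L.set i.toNat best) i 0 = best := by
      rw [PySem.List.pyGetD_eq_getElem _ _ hi (by rw [List.length_set]; exact hiL)]
      exact List.getElem_set_self _
    have e2 : PySem.List.pyGetD (L.set i.toNat best) (i - l) 0 = PySem.List.pyGetD L (i - l) 0 := by
      have h3 : 0 ≤ i - l := by omega
      have h4 : i - l < (L.length : Int) := by omega
      rw [PySem.List.pyGetD_eq_getElem _ _ h3 (by rw [List.length_set]; exact h4),
          PySem.List.pyGetD_eq_getElem _ _ h3 h4]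
      apply List.getElem_set_ne
      omega
    simp only [List.foldl_cons, e1, e2, List.set_set]
    exact ih (fun x hx => hls x (List.mem_cons_of_mem _ hx)) _ _

lemma pvOuterA (arr : List Int) (k : Int) (j : Nat) (hj : j ≤ arr.length) :
    (PySem.List.pyRange 1 ((j : Int) + 1) 1).foldl (fun dp i =>
      ((PySem.List.pyRange 1 (min k i + 1) 1).foldl (fun (st : List Int × Int) l =>
          let cm := max st.2 (PySem.List.pyGetD arr (i - l) 0)
          (st.1.set i.toNat (max (PySem.List.pyGetD st.1 i 0) (PySem.List.pyGetD st.1 (i - l) 0 + cm * l)), cm))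
        (dp, 0)).1) (List.replicate (arr.length + 1) 0)
    = pvTgt arr k j := by
  induction j with
  | zero =>
    rw [show (((0:Nat) : Int) + 1) = 1 by norm_num, PySem.List.pyRange_one_eq_nil le_rfl,
       List.foldl_nil]
    apply List.ext_getElem (by simp [pvTgt])
    intro t h1 h2
    simp only [pvTgt, List.getElem_replicate, List.getElem_map, List.getElem_range]
    split_ifs with h
    · have : t = 0 := by omega
      subst this; rfl
    · rfl
  | succ j ih =>
    have hj' : j ≤ arr.length := by omega
    have hcast : (((j+1 : Nat)) : Int) + 1 = (((j : Nat)) : Int) + 1 + 1 := by push_cast; ring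
    rw [hcast, PySem.List.pyRange_one_succ_right (by omega), List.foldl_append, ih hj']
    simp only [List.foldl_cons, List.foldl_nil]
    set i : Int := (j : Int) + 1 with hidef
    have hi0 : 0 ≤ i := by omega
    have hiN : i.toNat = j + 1 := by omega
    have hset0 : pvTgt arr k j = (pvTgt arr k j).set i.toNat (0:Int) := by
      apply List.ext_getElem (by simp)
      intro t h1 h2
      rw [List.getElem_set]
      split_ifs with h
      · simp only [pvTgt, List.getElem_map, List.getElem_range]
        rw [if_neg (by omega)]
      · rfl
    have hmem : ∀ l ∈ PySem.List.pyRange 1 (min k i + 1) 1, 1 ≤ l ∧ l ≤ i := by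
      intro l hl
      rw [PySem.List.mem_pyRange_one] at hl
      constructor
      · omega
      · have : l ≤ min k i := by omega
        omega
    have hlen : i.toNat < (pvTgt arr k j).length := by
      rw [pvTgt_length]; omega
    conv_lhs => rw [hset0]
    rw [pvInnerA arr k i (pvTgt arr k j) hi0 hlen _ hmem 0 0]
    have hfold :
        ((PySem.List.pyRange 1 (min k i + 1) 1).foldl (fun (st : Int × Int) l =>
            (max st.1 (PySem.List.pyGetD (pvTgt arr k j) (i - l) 0 + max st.2 (PySem.List.pyGetD arr (i - l) 0) * l),
             max st.2 (PySem.List.pyGetD arr (i - l) 0))) ((0:Int), (0:Int))).1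
          = (pvInner arr k (fun x => PySem.List.pyGetD (pvTgt arr k j) x 0) i).1 := rfl
    rw [hfold]
    have hcongr : pvInner arr k (fun x => PySem.List.pyGetD (pvTgt arr k j) x 0) i
        = pvInner arr k (fun x => pvF arr k x.toNat) i := by
      apply pvInner_congr
      intro l h1 h2
      have hli : l ≤ i := le_trans h2 (min_le_right _ _)
      have hjn : 0 ≤ i - l := by omega
      have hjl : i - l < ((pvTgt arr k j).length : Int) := by rw [pvTgt_length]; omega
      rw [PySem.List.pyGetD_eq_getElem _ _ hjn hjl, ← List.getD_eq_getElem]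
      rw [pvTgt_getD arr k j _ (by rw [pvTgt_length] at hjl; omega)]
      rw [if_pos (by omega)]
    rw [hcongr, ← pvF_succ arr k j]
    apply List.ext_getElem (by simp [pvTgt])
    intro t h1 h2
    rw [List.getElem_set]
    simp only [pvTgt, List.getElem_map, List.getElem_range]
    by_cases he : i.toNat = t
    · rw [if_pos he, if_pos (by omega)]
      congr 1 <;> omega
    · rw [if_neg he]
      by_cases h3 : t ≤ j
      · rw [if_pos h3, if_pos (by omega)]
      · rw [if_neg h3, if_neg (by omega)]

lemma pvA_eq (arr : List Int) (k : Int) : maxSumTab arr k = pvF arr k arr.length := by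
  unfold maxSumTab
  simp only [pvOuterA arr k arr.length le_rfl, PySem.List.pyGetD_natCast]
  rw [pvTgt_getD arr k arr.length arr.length (by omega), if_pos le_rfl]

-- ===== B-side =====

-- the memo dict after the optima for 0..m have been computed (in B's insertion order)
def pvMemo (arr : List Int) (k : Int) : Nat → PySem.Dict Int Int
  | 0 => (PySem.Dict.empty).insert 0 0
  | m+1 => (pvMemo arr k m).insert ((m : Int) + 1) (pvF arr k (m + 1))

-- Python's stack [n, n-1, ..., t] with the top as list head
def pvStack (n t : Nat) : List Int := (List.range' t (n + 1 - t)).map Int.ofNat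

lemma pvMemo_get? (arr : List Int) (k : Int) (m : Nat) (j : Int) :
    (pvMemo arr k m).get? j = if 0 ≤ j ∧ j ≤ m then some (pvF arr k j.toNat) else none := by
  induction m with
  | zero =>
    show ((PySem.Dict.empty : PySem.Dict Int Int).insert 0 0).get? j = _
    rw [PySem.Dict.get?_insert, PySem.Dict.get?_empty]
    by_cases h : j = 0
    · subst h
      rw [if_pos rfl, if_pos (by norm_num)]
      rfl
    · rw [if_neg h, if_neg (by omega)]
  | succ m ih =>
    show ((pvMemo arr k m).insert ((m : Int) + 1) (pvF arr k (m + 1))).get? j = _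
    rw [PySem.Dict.get?_insert]
    by_cases h : j = (m : Int) + 1
    · subst h
      rw [if_pos rfl, if_pos (by constructor <;> omega)]
      congr 2 <;> omega
    · rw [if_neg h, ih]
      by_cases h2 : 0 ≤ j ∧ j ≤ (m : Int)
      · rw [if_pos h2, if_pos (by push_cast; omega)]
      · rw [if_neg h2, if_neg (by push_cast; omega)]

lemma pvMemo_contains (arr : List Int) (k : Int) (m : Nat) (j : Int) :
    (pvMemo arr k m).contains j = decide (0 ≤ j ∧ j ≤ m) := by
  rw [PySem.Dict.contains_eq_isSome_get?, pvMemo_get?]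
  by_cases h : 0 ≤ j ∧ j ≤ (m : Int)
  · rw [if_pos h]
    simp [h]
  · rw [if_neg h]
    simp [h]

lemma pvMemo_getD (arr : List Int) (k : Int) (m : Nat) (j : Int) (h0 : 0 ≤ j) (hm : j ≤ m) :
    (pvMemo arr k m).getD j 0 = pvF arr k j.toNat := by
  rw [PySem.Dict.getD_eq_get?_getD, pvMemo_get?, if_pos ⟨h0, hm⟩]
  rfl

lemma pvStack_cons (n t : Nat) (h : t ≤ n) : pvStack n t = (t : Int) :: pvStack n (t + 1) := by
  unfold pvStack
  rw [show n + 1 - t = (n - t) + 1 by omega, List.range'_succ, List.map_cons,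
     show n - t = n + 1 - (t + 1) by omega]
  rfl

lemma pvStack_nil (n : Nat) : pvStack n (n + 1) = [] := by
  simp [pvStack]

lemma pvLoopB_nil (arr : List Int) (k : Int) (fuel : Nat) (memo : PySem.Dict Int Int) :
    pvLoopB arr k fuel memo [] = memo := by
  cases fuel <;> rfl

lemma pvLoopB_run (arr : List Int) (k : Int) (n : Nat) :
    ∀ (fuel m t : Nat), m + 1 ≤ t → t ≤ n → (t - m) + (n - m) + 1 ≤ fuel →
      pvLoopB arr k fuel (pvMemo arr k m) (pvStack n t) = pvMemo arr k n := by
  intro fuel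
  induction fuel with
  | zero => intro m t h1 h2 h3; omega
  | succ fuel ih =>
    intro m t h1 h2 h3
    rw [pvStack_cons n t h2]
    simp only [pvLoopB, pvMemo_contains]
    rw [show (decide (0 ≤ ((t : Int)) ∧ ((t : Int)) ≤ (m : Int))) = false by
          simp only [decide_eq_false_iff_not]; omega]
    simp only [Bool.false_eq_true, if_false]
    by_cases ht : t = m + 1
    · rw [show (decide (0 ≤ ((t : Int)) - 1 ∧ ((t : Int)) - 1 ≤ (m : Int))) = true by
            simp only [decide_eq_true_iff]; omega]
      simp only [Bool.not_true, Bool.false_eq_true, if_false]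
      have hval : ((PySem.List.pyRange 1 (min k ((t : Int)) + 1) 1).foldl
          (fun (st : Int × Int) l =>
            (max st.1 ((pvMemo arr k m).getD (((t : Int)) - l) 0
                + max st.2 (PySem.List.pyGetD arr (((t : Int)) - l) 0) * l),
             max st.2 (PySem.List.pyGetD arr (((t : Int)) - l) 0))) (0, 0)).1
          = pvF arr k t := by
        have e0 : ((PySem.List.pyRange 1 (min k ((t : Int)) + 1) 1).foldl
            (fun (st : Int × Int) l =>
              (max st.1 ((pvMemo arr k m).getD (((t : Int)) - l) 0
                  + max st.2 (PySem.List.pyGetD arr (((t : Int)) - l) 0) * l),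
               max st.2 (PySem.List.pyGetD arr (((t : Int)) - l) 0))) (0, 0))
            = pvInner arr k (fun x => (pvMemo arr k m).getD x 0) ((t : Int)) := rfl
        rw [e0, pvInner_congr arr k _ (fun x => pvF arr k x.toNat) _ ?hg]
        case hg =>
          intro l hl1 hl2
          have hli : l ≤ ((t : Int)) := le_trans hl2 (min_le_right _ _)
          exact pvMemo_getD arr k m _ (by omega) (by omega)
        have : ((t : Int)) = ((m : Int)) + 1 := by omega
        rw [this, ← pvF_succ arr k m, ht]
      rw [hval]
      have hmemo : (pvMemo arr k m).insert ((t : Int)) (pvF arr k t) = pvMemo arr k t := by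
        subst ht
        show _ = (pvMemo arr k m).insert ((m : Int) + 1) (pvF arr k (m + 1))
        congr 1 <;> omega
      rw [hmemo]
      rcases Nat.eq_or_lt_of_le h2 with he | hlt
      · subst he
        rw [pvStack_nil, pvLoopB_nil]
      · rw [ih t (t + 1) le_rfl (by omega) (by omega)]
    · rw [show (decide (0 ≤ ((t : Int)) - 1 ∧ ((t : Int)) - 1 ≤ (m : Int))) = false by
            simp only [decide_eq_false_iff_not]; omega]
      simp only [Bool.not_false, if_true]
      have hst : (((t : Int)) - 1) :: ((t : Int)) :: pvStack n (t + 1) = pvStack n (t - 1) := by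
        rw [pvStack_cons n (t - 1) (by omega), ← pvStack_cons n t h2]
        congr 1
        · omega
        · congr 1
          omega
      rw [hst, ih m (t - 1) (by omega) (by omega) (by omega)]

lemma pvLoopB_pop (arr : List Int) (k : Int) (fuel : Nat) (memo : PySem.Dict Int Int)
    (i : Int) (rest : List Int) (h : memo.contains i = true) :
    pvLoopB arr k (fuel + 1) memo (i :: rest) = pvLoopB arr k fuel memo rest := by
  simp [pvLoopB, h]

lemma pvB_eq (arr : List Int) (k : Int) : maxSumTab_alt arr k = pvF arr k arr.length := by
  rcases Nat.eq_zero_or_pos arr.length with h0 | hpos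
  · have harr : arr = [] := List.length_eq_zero_iff.mp h0
    subst harr
    show (pvLoopB [] k (2 + 1) ((PySem.Dict.empty).insert 0 0) [(0 : Int)]).getD 0 0 = pvF [] k 0
    rw [pvLoopB_pop _ _ _ _ _ _ (by
          rw [show ((PySem.Dict.empty : PySem.Dict Int Int).insert 0 0) = pvMemo [] k 0 from rfl,
             pvMemo_contains]
          norm_num),
       pvLoopB_nil]
    rfl
  · have e1 : ((PySem.Dict.empty : PySem.Dict Int Int).insert 0 0) = pvMemo arr k 0 := rfl
    have e2 : [((arr.length : Int))] = pvStack arr.length arr.length := by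
      rw [pvStack_cons _ _ le_rfl, pvStack_nil]
    simp only [maxSumTab_alt]
    rw [e1, e2, pvLoopB_run arr k arr.length (2 * arr.length + 3) 0 arr.length hpos le_rfl (by omega),
       pvMemo_getD arr k arr.length _ (by omega) (by omega)]
    simp

-- ===== VERDICT (by name: the statement is the Claim_ definition above) =====
theorem maxSumTab_spec : Claim_equal_maxSumTab := by
  intro arr k _
  unfold Spec_maxSumTab
  rw [pvA_eq, pvB_eq]
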